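-- pv_equiv track=rewrite | github.com/carmoskus/aoc2024 | day24.py | state_output
-- ===== SOURCE A (Python) =====
-- def state_output(state, k='z'):
--     opts = list(reversed(sorted(x for x in state.keys() if x.startswith(k))))
--     res = [state[x] for x in opts]
--     out = 0
--     for i in range(len(res)):
--         out <<= 1
--         out += res[i]
--     return out
-- ===== SOURCE B (Python) =====
-- def state_output(state, k='z'):
--     keys = sorted(x for x in state.keys() if x.startswith(k))
--     return sum(state[x] * 2**i for i, x in enumerate(keys))
-- ===== Notes on version B (the rewrite author's own statement) =====
-- stated objective: simpler
-- what changed: Replaces the descending-sort plus shift-left accumulator loop over an intermediate value list with a direct positional weighted sum over the ascending-sorted keys (state[x] * 2**i).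
import Mathlib
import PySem

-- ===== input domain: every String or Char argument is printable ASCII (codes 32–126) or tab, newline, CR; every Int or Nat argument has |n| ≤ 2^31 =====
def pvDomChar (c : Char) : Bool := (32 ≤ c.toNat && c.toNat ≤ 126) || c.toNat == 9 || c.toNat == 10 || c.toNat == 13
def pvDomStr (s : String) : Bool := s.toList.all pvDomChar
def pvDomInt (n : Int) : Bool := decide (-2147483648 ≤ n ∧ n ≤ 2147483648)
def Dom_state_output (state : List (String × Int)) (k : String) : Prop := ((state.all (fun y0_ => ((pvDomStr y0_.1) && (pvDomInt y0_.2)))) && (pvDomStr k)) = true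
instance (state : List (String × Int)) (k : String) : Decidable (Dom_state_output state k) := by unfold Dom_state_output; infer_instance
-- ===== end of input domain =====

-- B replaces A's descending sort + shift-left accumulator with an ascending sort and a direct
-- positional weighted sum (simpler decomposition; same result for all integer values).

-- ===== PORT A =====
def state_output (state : List (String × Int)) (k : String) : Int :=
  let d := PySem.Dict.ofList state
  let opts := (PySem.List.sorted ((d.keys).filter (fun x => PySem.Str.startswith x k)) (fun x => x) false).reverse
  let res := opts.map (fun x => d.getD x 0)
  (PySem.List.pyRange 0 (res.length : Int) 1).foldl
    (fun out i => (out <<< (1 : Nat)) + PySem.List.pyGetD res i 0) 0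

-- ===== PORT B =====
def state_output_alt (state : List (String × Int)) (k : String) : Int :=
  let d := PySem.Dict.ofList state
  let keys := PySem.List.sorted ((d.keys).filter (fun x => PySem.Str.startswith x k)) (fun x => x) false
  ((PySem.List.enumerate keys 0).map (fun p => d.getD p.2 0 * 2 ^ p.1.toNat)).sum

-- ===== PRECONDITION & SPEC =====
def Spec_state_output (state : List (String × Int)) (k : String) (out : Int) : Prop := out = state_output_alt state k
instance (state : List (String × Int)) (k : String) (out : Int) : Decidable (Spec_state_output state k out) := by unfold Spec_state_output; infer_instance

-- ===== CLAIM (what is proved, stated in full; the proofs are below) =====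
def Claim_equal_state_output : Prop := ∀ (state : List (String × Int)) (k : String), Dom_state_output state k → Spec_state_output state k (state_output state k)

-- ===== LEMMAS AND PROOFS =====

-- shifting the enumeration start multiplies the weighted sum by 2^s
theorem pv_wsum_shift {α : Type} (g : α → Int) (l : List α) : ∀ (s : Nat),
    ((PySem.List.enumerate l (s : Int)).map (fun p => g p.2 * 2 ^ p.1.toNat)).sum
      = 2 ^ s * ((PySem.List.enumerate l 0).map (fun p => g p.2 * 2 ^ p.1.toNat)).sum := by
  induction l with
  | nil => intro s; simp [PySem.List.enumerate_nil]
  | cons x t ih =>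
    intro s
    have h1 : (s : Int) + 1 = ((s + 1 : Nat) : Int) := by push_cast; ring
    have h0 : (0 : Int) + 1 = ((1 : Nat) : Int) := by norm_num
    simp only [PySem.List.enumerate_cons, List.map_cons, List.sum_cons, h1, h0, ih]
    have : ((s : Int)).toNat = s := Int.toNat_natCast s
    rw [this]
    simp only [Int.toNat_zero, pow_zero, pow_succ]
    ring

-- A's shift-left accumulator over the reversed list equals the positional weighted sum
theorem pv_fold_eq_wsum {α : Type} (g : α → Int) (l : List α) : ∀ (acc : Int),
    (l.reverse.map g).foldl (fun (a : Int) v => (a <<< (1 : Nat)) + v) acc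
      = acc * 2 ^ l.length + ((PySem.List.enumerate l 0).map (fun p => g p.2 * 2 ^ p.1.toNat)).sum := by
  induction l with
  | nil => intro acc; simp [PySem.List.enumerate_nil]
  | cons x t ih =>
    intro acc
    have h0 : (0 : Int) + 1 = ((1 : Nat) : Int) := by norm_num
    simp only [List.reverse_cons, List.map_append, List.foldl_append, List.map_cons,
      List.map_nil, List.foldl_cons, List.foldl_nil, ih,
      PySem.List.enumerate_cons, List.sum_cons, List.length_cons, h0, pv_wsum_shift]
    rw [Int.shiftLeft_eq]
    simp only [Int.toNat_zero, pow_zero, pow_succ]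
    ring

-- ===== VERDICT (by name: the statement is the Claim_ definition above) =====
theorem state_output_spec : Claim_equal_state_output := by
  intro state k _
  unfold Spec_state_output state_output state_output_alt
  rw [PySem.List.foldl_pyRange_zero_pyGetD']
  rw [pv_fold_eq_wsum (fun x => (PySem.Dict.ofList state).getD x 0)
      (PySem.List.sorted (((PySem.Dict.ofList state).keys).filter
        (fun x => PySem.Str.startswith x k)) (fun x => x) false) 0]
  simp
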